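-- pv_equiv track=rewrite | github.com/Avani-Brahmbhatt/Smart-Hire | smart_hire/resume.py | extract_projects_and_experience
-- ===== SOURCE A (Python) =====
-- def extract_projects_and_experience(resume_text):
--     """Extract projects and experience sections from resume text"""
--     projects = []
--     experience = []
--
--     lines = resume_text.split('\n')
--     current_section = None
--     current_content = []
--
--     for line in lines:
--         line_lower = line.lower().strip()
--
--         # Detect section headers
--         if any(keyword in line_lower for keyword in ['project', 'projects']):
--             if current_section and current_content:
--                 if current_section == 'projects':
--                     projects.extend(current_content)
--                 elif current_section == 'experience':
--                     experience.extend(current_content)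
--             current_section = 'projects'
--             current_content = [line.strip()]
--
--         elif any(keyword in line_lower for keyword in ['experience', 'work experience', 'employment', 'career']):
--             if current_section and current_content:
--                 if current_section == 'projects':
--                     projects.extend(current_content)
--                 elif current_section == 'experience':
--                     experience.extend(current_content)
--             current_section = 'experience'
--             current_content = [line.strip()]
--
--         elif line.strip() and current_section:
--             current_content.append(line.strip())
--
--     # Add remaining content
--     if current_section and current_content:
--         if current_section == 'projects':
--             projects.extend(current_content)
--         elif current_section == 'experience':
--             experience.extend(current_content)
--
--     return projects, experience
-- ===== SOURCE B (Python) =====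
-- def extract_projects_and_experience(resume_text):
--     """Extract projects and experience sections from resume text"""
--     projects = []
--     experience = []
--     current_section = None  # aliases projects or experience once a header is seen
--
--     for line in resume_text.split('\n'):
--         line_lower = line.lower().strip()
--         if any(keyword in line_lower for keyword in ['project', 'projects']):
--             current_section = projects
--             projects.append(line.strip())
--         elif any(keyword in line_lower for keyword in ['experience', 'work experience', 'employment', 'career']):
--             current_section = experience
--             experience.append(line.strip())
--         elif line.strip() and current_section is not None:
--             current_section.append(line.strip())
--
--     return projects, experience
-- ===== Notes on version B (the rewrite author's own statement) =====
-- stated objective: simpler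
-- what changed: B drops A's deferred current_content buffer and all three flush blocks, appending each stripped line directly to the current section's list via an aliased reference in a single pass.
import Mathlib
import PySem

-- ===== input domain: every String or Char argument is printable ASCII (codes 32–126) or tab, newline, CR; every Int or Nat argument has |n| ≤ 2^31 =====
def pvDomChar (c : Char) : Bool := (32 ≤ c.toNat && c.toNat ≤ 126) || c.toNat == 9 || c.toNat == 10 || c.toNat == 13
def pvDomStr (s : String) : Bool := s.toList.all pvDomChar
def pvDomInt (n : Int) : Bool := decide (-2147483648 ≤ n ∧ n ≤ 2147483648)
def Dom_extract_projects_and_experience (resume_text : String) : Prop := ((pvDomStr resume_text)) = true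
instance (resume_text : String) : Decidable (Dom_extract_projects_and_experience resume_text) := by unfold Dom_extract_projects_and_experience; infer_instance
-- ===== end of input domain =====

-- B is simpler: it drops A's deferred current_content buffer and all three flush blocks,
-- appending each stripped line directly to the current section's list in one pass.

-- ===== PORT A =====
-- the flush block A repeats three times:
-- 'if current_section and current_content: extend the matching list'
-- (section encoded as Option Bool: some true = "projects", some false = "experience")
def pvFlushA (p e : List String) (sec : Option Bool) (c : List String) :
    List String × List String :=
  if sec ≠ none ∧ c ≠ [] then
    match sec with
    | some true => (p ++ c, e)
    | some false => (p, e ++ c)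
    | none => (p, e)
  else (p, e)

-- one iteration of A's loop body
def pvStepA (st : List String × List String × Option Bool × List String) (line : String) :
    List String × List String × Option Bool × List String :=
  match st with
  | (p, e, sec, c) =>
    let line_lower := PySem.Str.strip (PySem.Str.lower line)
    if PySem.Str.isIn "project" line_lower || PySem.Str.isIn "projects" line_lower then
      let pe := pvFlushA p e sec c
      (pe.1, pe.2, some true, [PySem.Str.strip line])
    else if PySem.Str.isIn "experience" line_lower || PySem.Str.isIn "work experience" line_lower
        || PySem.Str.isIn "employment" line_lower || PySem.Str.isIn "career" line_lower then
      let pe := pvFlushA p e sec c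
      (pe.1, pe.2, some false, [PySem.Str.strip line])
    else if PySem.Str.strip line ≠ "" ∧ sec ≠ none then
      (p, e, sec, c ++ [PySem.Str.strip line])
    else (p, e, sec, c)

def extract_projects_and_experience (resume_text : String) : List String × List String :=
  let lines := (PySem.Str.split? resume_text "\n").getD []   -- sep "\n" ≠ "": split? is always some
  let st := lines.foldl pvStepA ([], [], none, [])
  pvFlushA st.1 st.2.1 st.2.2.1 st.2.2.2

-- ===== PORT B =====
-- one iteration of B's loop body (current_section aliases a list: some true = projects,
-- some false = experience; appends go straight to that list)
def pvStepB (st : List String × List String × Option Bool) (line : String) :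
    List String × List String × Option Bool :=
  match st with
  | (p, e, sec) =>
    let line_lower := PySem.Str.strip (PySem.Str.lower line)
    if PySem.Str.isIn "project" line_lower || PySem.Str.isIn "projects" line_lower then
      (p ++ [PySem.Str.strip line], e, some true)
    else if PySem.Str.isIn "experience" line_lower || PySem.Str.isIn "work experience" line_lower
        || PySem.Str.isIn "employment" line_lower || PySem.Str.isIn "career" line_lower then
      (p, e ++ [PySem.Str.strip line], some false)
    else if PySem.Str.strip line ≠ "" ∧ sec ≠ none then
      match sec with
      | some true => (p ++ [PySem.Str.strip line], e, sec)
      | _ => (p, e ++ [PySem.Str.strip line], sec)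
    else (p, e, sec)

def extract_projects_and_experience_alt (resume_text : String) : List String × List String :=
  let st := ((PySem.Str.split? resume_text "\n").getD []).foldl pvStepB ([], [], none)
  (st.1, st.2.1)

-- ===== PRECONDITION & SPEC =====
def Spec_extract_projects_and_experience (resume_text : String) (out : List String × List String) : Prop := out = extract_projects_and_experience_alt resume_text
instance (resume_text : String) (out : List String × List String) : Decidable (Spec_extract_projects_and_experience resume_text out) := by unfold Spec_extract_projects_and_experience; infer_instance

-- ===== CLAIM (what is proved, stated in full; the proofs are below) =====
def Claim_equal_extract_projects_and_experience : Prop := ∀ (resume_text : String), Dom_extract_projects_and_experience resume_text → Spec_extract_projects_and_experience resume_text (extract_projects_and_experience resume_text)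

-- ===== LEMMAS AND PROOFS =====

-- one loop iteration preserves the simulation relation between A's and B's states
set_option maxHeartbeats 1000000 in
theorem pv_step (p e : List String) (sec : Option Bool) (c : List String) (line : String)
    (h : sec = none → c = []) :
    ((pvStepA (p, e, sec, c) line).2.2.1 = none → (pvStepA (p, e, sec, c) line).2.2.2 = []) ∧
      pvFlushA (pvStepA (p, e, sec, c) line).1 (pvStepA (p, e, sec, c) line).2.1
          (pvStepA (p, e, sec, c) line).2.2.1 (pvStepA (p, e, sec, c) line).2.2.2 =
        ((pvStepB ((pvFlushA p e sec c).1, (pvFlushA p e sec c).2, sec) line).1,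
         (pvStepB ((pvFlushA p e sec c).1, (pvFlushA p e sec c).2, sec) line).2.1) ∧
      (pvStepA (p, e, sec, c) line).2.2.1 =
        (pvStepB ((pvFlushA p e sec c).1, (pvFlushA p e sec c).2, sec) line).2.2 := by
  cases sec with
  | none =>
    have hc : c = [] := h rfl
    subst hc
    dsimp only [pvStepA, pvStepB]
    split_ifs with h1 h2 h3
    · simp [pvFlushA]
    · simp [pvFlushA]
    · exact absurd h3.2 (by simp)
    · exact ⟨h, by simp [pvFlushA], rfl⟩
  | some b =>
    cases c with
    | nil =>
      cases b <;>
        (dsimp only [pvStepA, pvStepB]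
         split_ifs with h1 h2 h3 <;> simp [pvFlushA])
    | cons x cs =>
      cases b <;>
        (dsimp only [pvStepA, pvStepB]
         split_ifs with h1 h2 h3 <;> simp [pvFlushA, List.append_assoc])

-- loop invariant: flushing A's state yields B's lists, and the sections agree
theorem pv_loop (lines : List String) :
    ∀ (p e : List String) (sec : Option Bool) (c : List String), (sec = none → c = []) →
    ((lines.foldl pvStepA (p, e, sec, c)).2.2.1 = none →
        (lines.foldl pvStepA (p, e, sec, c)).2.2.2 = []) ∧
      pvFlushA (lines.foldl pvStepA (p, e, sec, c)).1 (lines.foldl pvStepA (p, e, sec, c)).2.1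
          (lines.foldl pvStepA (p, e, sec, c)).2.2.1 (lines.foldl pvStepA (p, e, sec, c)).2.2.2 =
        ((lines.foldl pvStepB ((pvFlushA p e sec c).1, (pvFlushA p e sec c).2, sec)).1,
         (lines.foldl pvStepB ((pvFlushA p e sec c).1, (pvFlushA p e sec c).2, sec)).2.1) ∧
      (lines.foldl pvStepA (p, e, sec, c)).2.2.1 =
        (lines.foldl pvStepB ((pvFlushA p e sec c).1, (pvFlushA p e sec c).2, sec)).2.2 := by
  induction lines with
  | nil => intro p e sec c h; exact ⟨h, rfl, rfl⟩
  | cons line rest ih =>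
    intro p e sec c h
    obtain ⟨h1, h2, h3⟩ := pv_step p e sec c line h
    simp only [List.foldl_cons]
    rcases hA : pvStepA (p, e, sec, c) line with ⟨p', e', sec', c'⟩
    rcases hB : pvStepB ((pvFlushA p e sec c).1, (pvFlushA p e sec c).2, sec) line with ⟨P', E', sec''⟩
    rw [hA] at h1 h2 h3
    rw [hB] at h2 h3
    dsimp only at h1 h2 h3
    subst h3
    obtain ⟨g1, g2, g3⟩ := ih p' e' sec' c' h1
    rw [h2] at g2 g3
    exact ⟨g1, g2, g3⟩

-- ===== VERDICT (by name: the statement is the Claim_ definition above) =====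
theorem extract_projects_and_experience_spec : Claim_equal_extract_projects_and_experience := by
  intro resume_text _
  unfold Spec_extract_projects_and_experience
  unfold extract_projects_and_experience extract_projects_and_experience_alt
  obtain ⟨-, h2, -⟩ :=
    pv_loop ((PySem.Str.split? resume_text "\n").getD []) [] [] none [] (fun _ => rfl)
  exact h2
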